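-- pv_equiv track=rewrite | github.com/DANLENEHAN/renetti | renetti/utils.py | process_files
-- ===== SOURCE A (Python) =====
-- from typing import Dict, List
--
-- def update_label_mappers(label: str, label_mapper: Dict[str, int], label_count: int, labels_list: List[int]) -> int:
--     """Helper function to update label mappers and assign numeric labels."""
--     if label not in label_mapper:
--         label_mapper[label] = label_count
--         labels_list.append(label_count)
--         label_count += 1
--     else:
--         labels_list.append(label_mapper[label])
--     return label_count
--
-- def process_files(file_paths: List[str], label_mapper_one: Dict[str, int], label_mapper_two: Dict[str, int], label_mapper_three: Dict[str, int]):
--     """Process file paths and generate labels for each category."""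
--     category_one_labels, category_two_labels, category_three_labels = [], [], []
--     category_two_count, category_three_count = 0, 0
--
--     for file in file_paths:
--         category_one_labels.append(0)  # Static for equipment vs. not_equipment
--         category_two = '_'.join(file.split("/")[4:5])
--         category_three = '_'.join(file.split("/")[4:6])
--
--         category_two_count = update_label_mappers(category_two, label_mapper_two, category_two_count, category_two_labels)
--         category_three_count = update_label_mappers(category_three, label_mapper_three, category_three_count, category_three_labels)
--
--     return category_one_labels, category_two_labels, category_three_labels
-- ===== SOURCE B (Python) =====
-- def _labels(keys, mapper):
--     """Two-phase labeling: first rank the unseen keys by first appearance,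
--     then map every key to its (pre-existing or new) label."""
--     new_order = {}
--     for k in keys:
--         if k not in mapper and k not in new_order:
--             new_order[k] = len(new_order)
--     labels = [mapper[k] if k in mapper else new_order[k] for k in keys]
--     mapper.update(new_order)
--     return labels
--
-- def process_files(file_paths, label_mapper_one, label_mapper_two, label_mapper_three):
--     keys_two = ['_'.join(f.split("/")[4:5]) for f in file_paths]
--     keys_three = ['_'.join(f.split("/")[4:6]) for f in file_paths]
--     return ([0] * len(file_paths),
--             _labels(keys_two, label_mapper_two),
--             _labels(keys_three, label_mapper_three))
-- ===== Notes on version B (the rewrite author's own statement) =====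
-- stated objective: simpler
-- what changed: Replaces the count-threading update_label_mappers helper and the interleaved per-file loop by a per-category two-phase pass: extract each file's key, rank the keys missing from the mapper by first appearance, then map every key straight to its label (the category-one list is just [0]*len).
import Mathlib
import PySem

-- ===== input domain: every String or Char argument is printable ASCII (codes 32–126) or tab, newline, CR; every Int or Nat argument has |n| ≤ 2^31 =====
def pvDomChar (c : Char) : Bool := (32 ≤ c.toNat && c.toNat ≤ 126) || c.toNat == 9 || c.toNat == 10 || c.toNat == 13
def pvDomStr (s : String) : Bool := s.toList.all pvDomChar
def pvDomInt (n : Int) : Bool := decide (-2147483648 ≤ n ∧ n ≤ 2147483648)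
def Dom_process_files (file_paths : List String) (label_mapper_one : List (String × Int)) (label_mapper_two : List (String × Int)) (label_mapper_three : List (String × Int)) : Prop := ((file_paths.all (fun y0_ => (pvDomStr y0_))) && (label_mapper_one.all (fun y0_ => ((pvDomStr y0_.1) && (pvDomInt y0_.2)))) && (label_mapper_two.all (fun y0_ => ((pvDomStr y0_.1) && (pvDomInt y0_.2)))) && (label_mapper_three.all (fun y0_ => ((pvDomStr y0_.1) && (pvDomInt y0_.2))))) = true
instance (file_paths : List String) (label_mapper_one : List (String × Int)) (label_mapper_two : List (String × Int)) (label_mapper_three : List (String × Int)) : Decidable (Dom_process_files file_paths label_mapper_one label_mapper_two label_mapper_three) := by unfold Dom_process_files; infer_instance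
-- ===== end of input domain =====

-- B replaces the count-threading helper by a two-phase per-category pass (rank unseen keys
-- by first appearance, then map every key to its label); equivalence is about the RETURN
-- value only (both Pythons mutate the passed mappers identically).

-- ===== PORT A =====
-- '_'.join(file.split("/")[4:hi])  (split? is some since the separator "/" is non-empty)
def pvKey (f : String) (hi : Int) : String :=
  PySem.Str.join "_" (PySem.List.slice ((PySem.Str.split? f "/").getD []) (some 4) (some hi))

def update_label_mappers (label : String) (label_mapper : PySem.Dict String Int)
    (label_count : Int) (labels_list : List Int) : Int × PySem.Dict String Int × List Int :=
  match label_mapper.get? label with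
  | none => (label_count + 1, label_mapper.insert label label_count, labels_list ++ [label_count])
  | some v => (label_count, label_mapper, labels_list ++ [v])

def process_files (file_paths : List String) (label_mapper_one : List (String × Int)) (label_mapper_two : List (String × Int)) (label_mapper_three : List (String × Int)) : List Int × List Int × List Int :=
  let st := file_paths.foldl
    (fun (st : List Int × List Int × List Int × Int × Int × PySem.Dict String Int × PySem.Dict String Int) f =>
      let l1 := st.1 ++ [(0 : Int)]
      let r2 := update_label_mappers (pvKey f 5) st.2.2.2.2.2.1 st.2.2.2.1 st.2.1
      let r3 := update_label_mappers (pvKey f 6) st.2.2.2.2.2.2 st.2.2.2.2.1 st.2.2.1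
      (l1, r2.2.2, r3.2.2, r2.1, r3.1, r2.2.1, r3.2.1))
    ([], [], [], 0, 0, PySem.Dict.ofList label_mapper_two, PySem.Dict.ofList label_mapper_three)
  (st.1, st.2.1, st.2.2.1)

-- ===== PORT B =====
-- first phase of _labels: rank the keys absent from mapper by first appearance
def pvBuildNew (mapper : PySem.Dict String Int) (keys : List String) : PySem.Dict String Int :=
  keys.foldl
    (fun nw k => if mapper.contains k = false ∧ nw.contains k = false
                 then nw.insert k (nw.size : Int) else nw)
    PySem.Dict.empty

def pvLabels (keys : List String) (mapper : PySem.Dict String Int) : List Int :=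
  let nw := pvBuildNew mapper keys
  keys.map (fun k => match mapper.get? k with | some v => v | none => nw.getD k 0)

def process_files_alt (file_paths : List String) (label_mapper_one : List (String × Int)) (label_mapper_two : List (String × Int)) (label_mapper_three : List (String × Int)) : List Int × List Int × List Int :=
  let keys_two := file_paths.map (fun f => pvKey f 5)
  let keys_three := file_paths.map (fun f => pvKey f 6)
  (List.replicate file_paths.length 0,
   pvLabels keys_two (PySem.Dict.ofList label_mapper_two),
   pvLabels keys_three (PySem.Dict.ofList label_mapper_three))

-- ===== PRECONDITION & SPEC =====
def Spec_process_files (file_paths : List String) (label_mapper_one : List (String × Int)) (label_mapper_two : List (String × Int)) (label_mapper_three : List (String × Int)) (out : List Int × List Int × List Int) : Prop := out = process_files_alt file_paths label_mapper_one label_mapper_two label_mapper_three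
instance (file_paths : List String) (label_mapper_one : List (String × Int)) (label_mapper_two : List (String × Int)) (label_mapper_three : List (String × Int)) (out : List Int × List Int × List Int) : Decidable (Spec_process_files file_paths label_mapper_one label_mapper_two label_mapper_three out) := by unfold Spec_process_files; infer_instance

-- ===== CLAIM (what is proved, stated in full; the proofs are below) =====
def Claim_equal_process_files : Prop := ∀ (file_paths : List String) (label_mapper_one : List (String × Int)) (label_mapper_two : List (String × Int)) (label_mapper_three : List (String × Int)), Dom_process_files file_paths label_mapper_one label_mapper_two label_mapper_three → Spec_process_files file_paths label_mapper_one label_mapper_two label_mapper_three (process_files file_paths label_mapper_one label_mapper_two label_mapper_three)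

-- ===== LEMMAS AND PROOFS =====

-- one category of A's loop, isolated
def catLoop (keys : List String) (m : PySem.Dict String Int) (c : Int) (acc : List Int) :
    PySem.Dict String Int × Int × List Int :=
  keys.foldl
    (fun st k =>
      let r := update_label_mappers k st.1 st.2.1 st.2.2
      (r.2.1, r.1, r.2.2))
    (m, c, acc)

-- buildNew's fold continued from an arbitrary accumulator
def buildAux (m nw : PySem.Dict String Int) (keys : List String) : PySem.Dict String Int :=
  keys.foldl
    (fun nw k => if m.contains k = false ∧ nw.contains k = false
                 then nw.insert k (nw.size : Int) else nw)
    nw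

lemma buildAux_cons (m nw : PySem.Dict String Int) (k : String) (ks : List String) :
    buildAux m nw (k :: ks) =
      buildAux m (if m.contains k = false ∧ nw.contains k = false
                  then nw.insert k (nw.size : Int) else nw) ks := rfl

lemma pvBuildNew_eq (m : PySem.Dict String Int) (keys : List String) :
    pvBuildNew m keys = buildAux m PySem.Dict.empty keys := rfl

-- entries already present persist through buildAux
lemma buildAux_get?_of_contains (keys : List String) (m nw : PySem.Dict String Int) (k : String)
    (h : nw.contains k = true) : (buildAux m nw keys).get? k = nw.get? k := by
  induction keys generalizing nw with
  | nil => rfl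
  | cons j ks ih =>
    rw [buildAux_cons]
    split_ifs with hj
    · have hne : k ≠ j := by
        rintro rfl; rw [h] at hj; exact absurd hj.2 (by simp)
      rw [ih _ (by rw [PySem.Dict.contains_insert]; simp [h]),
          PySem.Dict.get?_insert]
      simp [hne]
    · exact ih _ h

-- the invariant: A's single pass with merged state equals B's two phases
lemma catLoop_labels (keys : List String) (M m nw : PySem.Dict String Int) (acc : List Int)
    (hM : ∀ k, M.get? k = (m.get? k).or (nw.get? k)) :
    (catLoop keys M (nw.size : Int) acc).2.2 =
      acc ++ keys.map (fun k => match m.get? k with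
                                | some v => v
                                | none => (buildAux m nw keys).getD k 0) := by
  induction keys generalizing M nw acc with
  | nil => simp [catLoop]
  | cons k ks ih =>
    have hstep : catLoop (k :: ks) M (nw.size : Int) acc =
        catLoop ks ((update_label_mappers k M (nw.size : Int) acc).2.1)
          ((update_label_mappers k M (nw.size : Int) acc).1)
          ((update_label_mappers k M (nw.size : Int) acc).2.2) := rfl
    rw [hstep, buildAux_cons]
    rcases hm : m.get? k with _ | v
    · rcases hn : nw.get? k with _ | w
      · -- new key: both insert it with label nw.size
        have hMk : M.get? k = none := by rw [hM k, hm, hn]; rfl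
        have hmc : m.contains k = false := by
          rw [PySem.Dict.contains_eq_isSome_get?, hm]; rfl
        have hnc : nw.contains k = false := by
          rw [PySem.Dict.contains_eq_isSome_get?, hn]; rfl
        rw [if_pos ⟨hmc, hnc⟩]
        simp only [update_label_mappers, hMk]
        have hsz : ((nw.insert k (nw.size : Int)).size : Int) = (nw.size : Int) + 1 := by
          rw [PySem.Dict.size_insert, hnc]; push_cast; ring
        have := ih (M.insert k (nw.size : Int)) (nw.insert k (nw.size : Int))
          (acc ++ [(nw.size : Int)])
          (fun j => by
            by_cases hj : j = k
            · subst hj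
              rw [PySem.Dict.get?_insert_self, PySem.Dict.get?_insert_self, hm]; rfl
            · rw [PySem.Dict.get?_insert, PySem.Dict.get?_insert, hM j]
              simp [hj])
        rw [← hsz, this, List.append_assoc]
        congr 2
        · simp only [List.cons_append, List.nil_append, List.map_cons]
          congr 1
          rw [hm]
          have hc : (nw.insert k (nw.size : Int)).contains k = true :=
            PySem.Dict.contains_insert_self _ _ _
          rw [PySem.Dict.getD_eq_get?_getD,
              buildAux_get?_of_contains _ _ _ _ hc, PySem.Dict.get?_insert_self]
          rfl
      · -- key unseen in m but already ranked in nw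
        have hMk : M.get? k = some w := by rw [hM k, hm, hn]; rfl
        have hnc : nw.contains k = true := by
          rw [PySem.Dict.contains_eq_isSome_get?, hn]; rfl
        simp only [update_label_mappers, hMk]
        rw [if_neg (by simp [hnc])]
        rw [ih M nw (acc ++ [w]) hM, List.append_assoc]
        congr 2
        simp only [List.cons_append, List.nil_append, List.map_cons]
        congr 1
        rw [hm, PySem.Dict.getD_eq_get?_getD,
            buildAux_get?_of_contains _ _ _ _ hnc, hn]
        rfl
    · -- key present in the original mapper
      have hMk : M.get? k = some v := by rw [hM k, hm]; rfl
      have hmc : m.contains k = true := by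
        rw [PySem.Dict.contains_eq_isSome_get?, hm]; rfl
      simp only [update_label_mappers, hMk]
      rw [if_neg (by simp [hmc])]
      rw [ih M nw (acc ++ [v]) hM, List.append_assoc]
      congr 2
      simp [hm]

lemma catLoop_eq_pvLabels (keys : List String) (m : PySem.Dict String Int) :
    (catLoop keys m 0 []).2.2 = pvLabels keys m := by
  have h := catLoop_labels keys m m PySem.Dict.empty []
    (fun k => by cases m.get? k <;> simp [PySem.Dict.get?_empty])
  simpa [pvLabels, pvBuildNew_eq] using h

-- A's combined fold decomposes into the two independent category loops
lemma fold_decomp (fps : List String)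
    (l1 l2 l3 : List Int) (c2 c3 : Int) (m2 m3 : PySem.Dict String Int) :
    fps.foldl
      (fun (st : List Int × List Int × List Int × Int × Int × PySem.Dict String Int × PySem.Dict String Int) f =>
        let l1 := st.1 ++ [(0 : Int)]
        let r2 := update_label_mappers (pvKey f 5) st.2.2.2.2.2.1 st.2.2.2.1 st.2.1
        let r3 := update_label_mappers (pvKey f 6) st.2.2.2.2.2.2 st.2.2.2.2.1 st.2.2.1
        (l1, r2.2.2, r3.2.2, r2.1, r3.1, r2.2.1, r3.2.1))
      (l1, l2, l3, c2, c3, m2, m3) =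
    (l1 ++ List.replicate fps.length 0,
     (catLoop (fps.map (fun f => pvKey f 5)) m2 c2 l2).2.2,
     (catLoop (fps.map (fun f => pvKey f 6)) m3 c3 l3).2.2,
     (catLoop (fps.map (fun f => pvKey f 5)) m2 c2 l2).2.1,
     (catLoop (fps.map (fun f => pvKey f 6)) m3 c3 l3).2.1,
     (catLoop (fps.map (fun f => pvKey f 5)) m2 c2 l2).1,
     (catLoop (fps.map (fun f => pvKey f 6)) m3 c3 l3).1) := by
  induction fps generalizing l1 l2 l3 c2 c3 m2 m3 with
  | nil => simp [catLoop]
  | cons f fs ih =>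
    simp only [List.foldl_cons, List.map_cons]
    rw [ih]
    have h2 : ∀ (keys : List String) (m : PySem.Dict String Int) (c : Int) (acc : List Int) (k : String),
        catLoop (k :: keys) m c acc =
          catLoop keys ((update_label_mappers k m c acc).2.1)
            ((update_label_mappers k m c acc).1)
            ((update_label_mappers k m c acc).2.2) := fun _ _ _ _ _ => rfl
    rw [h2, h2]
    simp [List.replicate_succ, List.append_assoc]

-- ===== VERDICT (by name: the statement is the Claim_ definition above) =====
set_option maxRecDepth 8000 in
theorem process_files_spec : Claim_equal_process_files := by
  intro fps lm1 lm2 lm3 _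
  show process_files fps lm1 lm2 lm3 = process_files_alt fps lm1 lm2 lm3
  unfold process_files process_files_alt
  rw [fold_decomp]
  simp only [List.nil_append, catLoop_eq_pvLabels]
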